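-- pv_equiv track=rewrite | github.com/strata-ai-labs/strata-eval | scripts/verify_bm25.py | strata_tokenize
-- ===== SOURCE A (Python) =====
-- def strata_tokenize(text: str) -> list[str]:
--     """Lowercase, split on non-alphanumeric, filter < 2 chars."""
--     tokens = []
--     current = []
--     for ch in text.lower():
--         if ch.isalnum():
--             current.append(ch)
--         else:
--             if current:
--                 token = "".join(current)
--                 if len(token) >= 2:
--                     tokens.append(token)
--                 current = []
--     if current:
--         token = "".join(current)
--         if len(token) >= 2:
--             tokens.append(token)
--     return tokens
-- ===== SOURCE B (Python) =====
-- def strata_tokenize(text: str) -> list[str]: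
--     """Lowercase, split on non-alphanumeric, filter < 2 chars."""
--     masked = "".join(c if c.isalnum() else " " for c in text.lower())
--     return [tok for tok in masked.split() if len(tok) >= 2]
-- ===== Notes on version B (the rewrite author's own statement) =====
-- stated objective: idiomatic
-- what changed: Replaced the manual character-accumulation loop with its flush duplicated at end-of-string by masking every non-alphanumeric character to a space and letting str.split() produce the runs, filtered by length in a comprehension.
import Mathlib
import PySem

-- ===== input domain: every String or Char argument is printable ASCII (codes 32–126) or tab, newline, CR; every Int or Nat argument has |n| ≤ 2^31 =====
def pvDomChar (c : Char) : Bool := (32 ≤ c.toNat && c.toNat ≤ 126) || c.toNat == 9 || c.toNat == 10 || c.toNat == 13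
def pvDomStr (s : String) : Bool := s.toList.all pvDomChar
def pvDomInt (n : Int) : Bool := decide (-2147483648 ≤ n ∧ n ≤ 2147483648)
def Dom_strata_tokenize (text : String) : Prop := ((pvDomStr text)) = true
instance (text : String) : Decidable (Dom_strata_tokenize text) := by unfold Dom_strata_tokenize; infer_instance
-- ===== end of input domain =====

-- B masks non-alphanumeric characters to spaces and uses str.split() instead of A's manual
-- character-accumulation loop with its duplicated end-of-string flush (idiomatic rewrite, same cost).


-- ===== PORT A =====
-- A's for-loop as structural recursion over the characters, state = (tokens, current)
def strataGo (cs : List Char) (toks : List String) (cur : List Char) : List String :=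
  match cs with
  | [] =>
      if cur.isEmpty then toks
      else if 2 ≤ cur.length then toks ++ [String.ofList cur] else toks
  | c :: rest =>
      if PySem.Chars.isalnum c then strataGo rest toks (cur ++ [c])
      else if cur.isEmpty then strataGo rest toks cur
      else strataGo rest (if 2 ≤ cur.length then toks ++ [String.ofList cur] else toks) []

def strata_tokenize (text : String) : List String :=
  strataGo (PySem.Chars.lower text.toList) [] []

-- ===== PORT B =====
def strata_tokenize_alt (text : String) : List String :=
  let masked := (PySem.Chars.lower text.toList).map
    (fun c => if PySem.Chars.isalnum c then c else ' ')
  ((PySem.Chars.split₀ masked).filter (fun t => 2 ≤ t.length)).map String.ofList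

-- ===== PRECONDITION & SPEC =====
def Spec_strata_tokenize (text : String) (out : List String) : Prop := out = strata_tokenize_alt text
instance (text : String) (out : List String) : Decidable (Spec_strata_tokenize text out) := by unfold Spec_strata_tokenize; infer_instance

-- ===== CLAIM (what is proved, stated in full; the proofs are below) =====
def Claim_equal_strata_tokenize : Prop := ∀ (text : String), Dom_strata_tokenize text → Spec_strata_tokenize text (strata_tokenize text)

-- ===== LEMMAS AND PROOFS =====

-- an alphanumeric character is never whitespace, so masking keeps word runs intact
lemma not_isspace_of_isalnum (c : Char) (h : PySem.Chars.isalnum c = true) :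
    PySem.Chars.isspace c = false := by
  simp [PySem.Chars.isalnum, PySem.Chars.isalpha, PySem.Chars.isdigit, PySem.Chars.isupper,
    PySem.Chars.islower, PySem.Chars.isspace, Char.le_def, UInt32.le_iff_toNat_le] at h ⊢
  omega

-- split₀.go's word accumulator commutes out as a prefix
lemma splitGo_acc (s : List Char) (cur : List Char) (acc : List (List Char)) :
    PySem.Chars.split₀.go s cur acc = acc.reverse ++ PySem.Chars.split₀.go s cur [] := by
  induction s generalizing cur acc with
  | nil => simp [PySem.Chars.split₀.go]; split <;> simp
  | cons c rest ih =>
    simp only [PySem.Chars.split₀.go]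
    split
    · split
      · exact ih [] acc
      · rw [ih [] (cur.reverse :: acc), ih [] [cur.reverse]]; simp
    · exact ih (c :: cur) acc

-- loop invariant: A's loop with pending buffer cur equals toks ++ B's pipeline on the rest
lemma strataGo_eq (cs : List Char) (toks : List String) (cur : List Char) :
    strataGo cs toks cur =
      toks ++ ((PySem.Chars.split₀.go
          (cs.map (fun c => if PySem.Chars.isalnum c then c else ' '))
          cur.reverse []).filter (fun t => 2 ≤ t.length)).map String.ofList := by
  induction cs generalizing toks cur with
  | nil =>
    simp only [strataGo, List.map_nil, PySem.Chars.split₀.go, List.isEmpty_reverse,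
      List.reverse_reverse, List.reverse_nil]
    by_cases hc : cur.isEmpty
    · simp [hc]
    · simp only [hc, if_neg, Bool.false_eq_true, not_false_iff]
      by_cases hl : 2 ≤ cur.length <;> simp [hl]
  | cons c rest ih =>
    simp only [strataGo, List.map_cons, PySem.Chars.split₀.go]
    by_cases ha : PySem.Chars.isalnum c
    · rw [if_pos ha, if_pos ha, if_neg (by simp [not_isspace_of_isalnum c ha]), ih]
      simp
    · rw [if_neg ha, if_neg ha]
      have hsp : PySem.Chars.isspace ' ' = true := by decide
      rw [if_pos hsp]
      by_cases hc : cur.isEmpty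
      · have hc' : cur = [] := List.isEmpty_iff.mp hc
        subst hc'
        simpa using ih toks []
      · have hcne : cur ≠ [] := by simpa [List.isEmpty_iff] using hc
        rw [if_neg hc, if_neg (by simp [hcne] : ¬ ((cur.reverse).isEmpty = true))]
        rw [splitGo_acc _ [] [cur.reverse.reverse], ih]
        by_cases hl : 2 ≤ cur.length <;> simp [hl]

-- ===== VERDICT (by name: the statement is the Claim_ definition above) =====
theorem strata_tokenize_spec : Claim_equal_strata_tokenize := by
  intro text _
  show _ = _
  simp only [strata_tokenize, strata_tokenize_alt, PySem.Chars.split₀]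
  simpa using strataGo_eq (PySem.Chars.lower text.toList) [] []
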